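-- pv_equiv track=rewrite | github.com/frankzhiy/AgentLabILD | src/agents/case_structurer.py | _detect_forbidden_payload_fields
-- ===== SOURCE A (Python) =====
-- from collections.abc import Mapping
--
-- FORBIDDEN_PAYLOAD_FIELDS = frozenset(
--     {
--         "final_diagnosis",
--         "differential_diagnosis",
--         "hypotheses",
--         "hypothesis_state",
--         "evidence_atoms",
--         "action_candidates",
--         "action_plan",
--         "arbitration_output",
--         "treatment_recommendation",
--         "confidence",
--         "safety_decision",
--         "conflict",
--     }
-- )
--
-- def _detect_forbidden_payload_fields(payload: Mapping[str, object]) -> tuple[str, ...]: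
--     payload_keys = {key for key in payload.keys() if isinstance(key, str)}
--     forbidden_fields = sorted(payload_keys.intersection(FORBIDDEN_PAYLOAD_FIELDS))
--
--     if not forbidden_fields:
--         return ()
--
--     return tuple(
--         f"payload contains forbidden field: {field_name}" for field_name in forbidden_fields
--     )
-- ===== SOURCE B (Python) =====
-- FORBIDDEN_PAYLOAD_FIELDS = frozenset(
--     {
--         "final_diagnosis",
--         "differential_diagnosis",
--         "hypotheses",
--         "hypothesis_state",
--         "evidence_atoms",
--         "action_candidates",
--         "action_plan",
--         "arbitration_output",
--         "treatment_recommendation",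
--         "confidence",
--         "safety_decision",
--         "conflict",
--     }
-- )
--
--
-- def _detect_forbidden_payload_fields(payload):
--     # Single pass over the payload: collect forbidden str keys into `hits`,
--     # kept strictly sorted by on-line sorted insertion (duplicates skipped).
--     hits = []
--     for key in payload.keys():
--         if isinstance(key, str) and key in FORBIDDEN_PAYLOAD_FIELDS and key not in hits:
--             i = 0
--             while i < len(hits) and hits[i] < key:
--                 i += 1
--             hits.insert(i, key)
--     return tuple("payload contains forbidden field: " + k for k in hits)
-- ===== Notes on version B (the rewrite author's own statement) =====
-- stated objective: alternative
-- what changed: B replaces A's build-key-set / set-intersection / sort pipeline by a single pass over the payload that inserts each forbidden key into an accumulator kept strictly sorted by on-line sorted insertion (duplicates skipped), then formats; no set object and no final sort.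
import Mathlib
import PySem

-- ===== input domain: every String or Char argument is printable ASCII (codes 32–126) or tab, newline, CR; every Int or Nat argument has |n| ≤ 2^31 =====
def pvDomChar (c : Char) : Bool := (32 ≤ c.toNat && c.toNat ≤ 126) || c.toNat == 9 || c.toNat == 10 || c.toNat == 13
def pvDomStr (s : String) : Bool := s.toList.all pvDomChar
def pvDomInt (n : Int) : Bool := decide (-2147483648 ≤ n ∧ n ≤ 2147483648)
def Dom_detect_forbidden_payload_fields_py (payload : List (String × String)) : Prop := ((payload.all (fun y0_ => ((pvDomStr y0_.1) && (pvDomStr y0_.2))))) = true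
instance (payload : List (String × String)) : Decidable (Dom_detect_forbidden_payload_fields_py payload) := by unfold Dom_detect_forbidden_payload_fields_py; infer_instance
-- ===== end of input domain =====

-- B replaces A's build-key-set / intersect / sort pipeline by one pass over the payload
-- that inserts each forbidden key into a strictly-sorted accumulator (alternative decomposition).


-- ===== PORT A =====
-- FORBIDDEN_PAYLOAD_FIELDS (frozenset; consumed only order-insensitively)
def pvForbiddenFields : PySem.Set String :=
  PySem.Set.ofList
    ["final_diagnosis", "differential_diagnosis", "hypotheses", "hypothesis_state",
     "evidence_atoms", "action_candidates", "action_plan", "arbitration_output",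
     "treatment_recommendation", "confidence", "safety_decision", "conflict"]

def detect_forbidden_payload_fields_py (payload : List (String × String)) : List String :=
  -- payload_keys = {key for key in payload.keys() if isinstance(key, str)} — all keys are str here
  let payload_keys : PySem.Set String := PySem.Set.ofList (payload.map Prod.fst)
  let forbidden_fields :=
    PySem.List.sorted (PySem.Set.inter payload_keys pvForbiddenFields) (fun x => x) false
  if forbidden_fields = [] then []
  else forbidden_fields.map (fun field_name => "payload contains forbidden field: " ++ field_name)

-- ===== PORT B =====
-- the inner while/insert: place `key` before the first element not < key
def pvInsertHit (key : String) : List String → List String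
  | [] => [key]
  | h :: t => if h < key then h :: pvInsertHit key t else key :: h :: t

def detect_forbidden_payload_fields_py_alt (payload : List (String × String)) : List String :=
  -- single pass: hits kept strictly sorted, duplicates skipped
  let hits := payload.foldl
    (fun hits kv =>
      if PySem.Set.contains pvForbiddenFields kv.1 && !(hits.contains kv.1)
      then pvInsertHit kv.1 hits else hits) []
  hits.map (fun k => "payload contains forbidden field: " ++ k)

-- ===== PRECONDITION & SPEC =====
def Spec_detect_forbidden_payload_fields_py (payload : List (String × String)) (out : List String) : Prop := out = detect_forbidden_payload_fields_py_alt payload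
instance (payload : List (String × String)) (out : List String) : Decidable (Spec_detect_forbidden_payload_fields_py payload out) := by unfold Spec_detect_forbidden_payload_fields_py; infer_instance

-- ===== CLAIM (what is proved, stated in full; the proofs are below) =====
def Claim_equal_detect_forbidden_payload_fields_py : Prop := ∀ (payload : List (String × String)), Dom_detect_forbidden_payload_fields_py payload → Spec_detect_forbidden_payload_fields_py payload (detect_forbidden_payload_fields_py payload)

-- ===== LEMMAS AND PROOFS =====

lemma pvMem_insertHit (a x : String) (l : List String) :
    a ∈ pvInsertHit x l ↔ a = x ∨ a ∈ l := by
  induction l with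
  | nil => simp [pvInsertHit]
  | cons h t ih =>
    simp only [pvInsertHit]
    split
    · simp [ih]; tauto
    · simp [List.mem_cons]

lemma pvPairwise_insertHit (x : String) (l : List String)
    (hl : l.Pairwise (· < ·)) (hx : x ∉ l) :
    (pvInsertHit x l).Pairwise (· < ·) := by
  induction l with
  | nil => simp [pvInsertHit]
  | cons h t ih =>
    simp only [List.mem_cons, not_or] at hx
    simp only [pvInsertHit]
    split
    · rename_i hlt
      have hl' := List.pairwise_cons.mp hl
      rw [List.pairwise_cons]
      refine ⟨fun b hb => ?_, ih hl'.2 hx.2⟩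
      rcases (pvMem_insertHit b x t).mp hb with rfl | hbt
      · exact hlt
      · exact hl'.1 b hbt
    · rename_i hnlt
      have hxh : x < h := lt_of_le_of_ne (not_lt.mp hnlt) hx.1
      have hl' := List.pairwise_cons.mp hl
      rw [List.pairwise_cons]
      exact ⟨fun b hb => by
        rcases List.mem_cons.mp hb with rfl | hbt
        · exact hxh
        · exact lt_trans hxh (hl'.1 b hbt), hl⟩

-- loop invariant: the accumulator stays strictly sorted and holds exactly the
-- old hits plus the forbidden keys seen so far
lemma pvLoop_inv (payload : List (String × String)) (hits : List String)
    (hp : hits.Pairwise (· < ·)) :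
    (payload.foldl
      (fun hits kv =>
        if PySem.Set.contains pvForbiddenFields kv.1 && !(hits.contains kv.1)
        then pvInsertHit kv.1 hits else hits) hits).Pairwise (· < ·) ∧
    ∀ a, a ∈ payload.foldl
      (fun hits kv =>
        if PySem.Set.contains pvForbiddenFields kv.1 && !(hits.contains kv.1)
        then pvInsertHit kv.1 hits else hits) hits ↔
      a ∈ hits ∨ (a ∈ payload.map Prod.fst ∧ a ∈ pvForbiddenFields) := by
  induction payload generalizing hits with
  | nil => simpa using hp
  | cons kv rest ih =>
    simp only [List.foldl_cons]
    split
    · rename_i hc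
      simp only [Bool.and_eq_true, Bool.not_eq_true', List.contains_eq_mem,
        decide_eq_false_iff_not, PySem.Set.contains, List.contains_eq_mem, decide_eq_true_eq] at hc
      obtain ⟨h1, h2⟩ := hc
      obtain ⟨ip, im⟩ := ih (pvInsertHit kv.1 hits) (pvPairwise_insertHit _ _ hp h2)
      refine ⟨ip, fun a => ?_⟩
      rw [im a, pvMem_insertHit]
      simp only [List.map_cons, List.mem_cons]
      constructor
      · rintro ((rfl | h) | h) <;> tauto
      · rintro (h | ⟨(rfl | h), hf⟩) <;> tauto
    · rename_i hc
      simp only [Bool.and_eq_true, Bool.not_eq_true', List.contains_eq_mem,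
        decide_eq_false_iff_not, PySem.Set.contains, List.contains_eq_mem, decide_eq_true_eq, not_and, not_not] at hc
      obtain ⟨ip, im⟩ := ih hits hp
      refine ⟨ip, fun a => ?_⟩
      rw [im a]
      simp only [List.map_cons, List.mem_cons]
      constructor
      · rintro (h | h) <;> tauto
      · rintro (h | ⟨(rfl | h), hf⟩)
        · tauto
        · exact Or.inl (hc hf)
        · tauto

-- A's sorted intersection equals B's accumulated hits list
lemma pvSorted_inter_eq_loop (payload : List (String × String)) :
    PySem.List.sorted
      (PySem.Set.inter (PySem.Set.ofList (payload.map Prod.fst)) pvForbiddenFields)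
      (fun x => x) false
    = payload.foldl
      (fun hits kv =>
        if PySem.Set.contains pvForbiddenFields kv.1 && !(hits.contains kv.1)
        then pvInsertHit kv.1 hits else hits) [] := by
  obtain ⟨ip, im⟩ := pvLoop_inv payload [] (by simp)
  apply PySem.List.sorted_eq_of_perm_of_pairwise_lt
  · rw [List.perm_ext_iff_of_nodup]
    · intro a
      rw [im a]
      simp only [pysem, List.not_mem_nil, false_or]
    · exact ip.imp ne_of_lt
    · simp only [PySem.Set.inter]
      exact (PySem.Set.nodup_ofList _).filter _
  · exact ip

-- ===== VERDICT (by name: the statement is the Claim_ definition above) =====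
theorem detect_forbidden_payload_fields_py_spec : Claim_equal_detect_forbidden_payload_fields_py := by
  intro payload _
  unfold Spec_detect_forbidden_payload_fields_py
  simp only [detect_forbidden_payload_fields_py, detect_forbidden_payload_fields_py_alt]
  rw [pvSorted_inter_eq_loop]
  split
  · rename_i h; rw [h]; simp
  · rfl
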